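-- pv_equiv track=rewrite | github.com/LegoSorter/Tools | find_all_names.py | add_to_group
-- ===== SOURCE A (Python) =====
-- from typing import List
--
-- def contains_any(group_base, names):
--     for name in names:
--         if name in group_base:
--             return True
--     return False
--
-- def add_to_group(all_groups: List[List], names):
--     all_groups_merged = []
--     merged_group = []
--     for group_names in all_groups:
--         if contains_any(group_names, names):
--             merged_group.extend(group_names)
--             merged_group.extend(names)
--             merged_group = list(dict.fromkeys(merged_group))  # It removes duplicates while keeping order
--         else:
--             all_groups_merged.append(list(dict.fromkeys(group_names)))
--
--     all_groups_merged.append(merged_group if len(merged_group) > 0 else names)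
--     return all_groups_merged
-- ===== SOURCE B (Python) =====
-- def add_to_group(all_groups, names):
--     # Inverted index: name -> set of indices of groups containing it.
--     index = {}
--     for i, group in enumerate(all_groups):
--         for name in group:
--             index.setdefault(name, set()).add(i)
--     # Indices of groups sharing at least one name with `names`.
--     matched = set()
--     for name in names:
--         matched.update(index.get(name, set()))
--     result = [list(dict.fromkeys(g)) for i, g in enumerate(all_groups) if i not in matched]
--     if matched:
--         merged = []
--         for i in sorted(matched):
--             merged.extend(all_groups[i])
--             merged.extend(names)
--         result.append(list(dict.fromkeys(merged)))
--     else: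
--         result.append(names)
--     return result
-- ===== Notes on version B (the rewrite author's own statement) =====
-- stated objective: alternative
-- what changed: B builds an inverted index (name -> set of group indices) over all groups, probes it with `names` to obtain the matched index set, then emits unmatched groups by a comprehension and reconstructs the merged group by walking sorted(matched) with one final dedup, instead of A's single pass with list-scan membership and incremental re-dedup.
import Mathlib
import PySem

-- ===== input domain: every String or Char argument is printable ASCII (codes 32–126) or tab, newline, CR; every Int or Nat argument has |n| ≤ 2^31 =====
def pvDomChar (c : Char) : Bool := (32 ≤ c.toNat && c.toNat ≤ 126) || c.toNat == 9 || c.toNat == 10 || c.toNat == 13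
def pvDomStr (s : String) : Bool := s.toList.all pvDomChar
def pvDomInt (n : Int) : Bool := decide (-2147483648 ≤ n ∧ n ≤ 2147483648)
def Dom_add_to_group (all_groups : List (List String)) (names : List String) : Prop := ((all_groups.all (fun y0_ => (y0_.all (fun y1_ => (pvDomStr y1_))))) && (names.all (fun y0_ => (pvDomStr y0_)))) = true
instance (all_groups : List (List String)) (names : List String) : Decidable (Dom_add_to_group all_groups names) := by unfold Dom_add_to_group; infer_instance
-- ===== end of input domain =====

-- B replaces A's single pass (list-scan membership test per group, incremental re-dedup of the
-- merged group on every match) by an inverted index name -> set of group indices, probed with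
-- `names` to get the matched index set; unmatched groups are emitted by a comprehension and the
-- merged group is rebuilt by walking sorted(matched) with one final dedup.

-- ===== PORT A =====
def contains_any (group_base : List String) (names : List String) : Bool :=
  match names with
  | [] => false
  | n :: rest => if group_base.contains n then true else contains_any group_base rest

def addLoopA (names : List String) :
    List (List String) → List (List String) → List String → List (List String) × List String
  | [], acc, merged => (acc, merged)
  | g :: rest, acc, merged =>
    if contains_any g names then
      addLoopA names rest acc (PySem.List.dedup (merged ++ g ++ names))
    else
      addLoopA names rest (acc ++ [PySem.List.dedup g]) merged

def add_to_group (all_groups : List (List String)) (names : List String) : List (List String) :=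
  let st := addLoopA names all_groups [] []
  st.1 ++ [if st.2.length > 0 then st.2 else names]

-- ===== PORT B =====
-- index = {}; for i, group in enumerate(all_groups): for name in group: index.setdefault(name, set()).add(i)
def buildIndex (all_groups : List (List String)) : PySem.Dict String (PySem.Set Int) :=
  (PySem.List.enumerate all_groups).foldl
    (fun d p => p.2.foldl (fun d name => d.modify name [] (fun s => PySem.Set.add s p.1)) d)
    PySem.Dict.empty

-- matched = set(); for name in names: matched.update(index.get(name, set()))
def matchedSet (index : PySem.Dict String (PySem.Set Int)) (names : List String) : PySem.Set Int :=
  names.foldl (fun m name => PySem.Set.update m (index.getD name [])) []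

def add_to_group_alt (all_groups : List (List String)) (names : List String) : List (List String) :=
  let index := buildIndex all_groups
  let matched := matchedSet index names
  let result := (PySem.List.enumerate all_groups).foldl
    (fun acc p => if p.1 ∉ matched then acc ++ [PySem.List.dedup p.2] else acc) []
  match matched with
  | [] => result ++ [names]
  | _ => result ++ [PySem.List.dedup
      ((PySem.List.sorted matched (fun x => x)).foldl
        (fun m i => m ++ PySem.List.pyGetD all_groups i [] ++ names) [])]

-- ===== PRECONDITION & SPEC =====
def Spec_add_to_group (all_groups : List (List String)) (names : List String) (out : List (List String)) : Prop := out = add_to_group_alt all_groups names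
instance (all_groups : List (List String)) (names : List String) (out : List (List String)) : Decidable (Spec_add_to_group all_groups names out) := by unfold Spec_add_to_group; infer_instance

-- ===== CLAIM (what is proved, stated in full; the proofs are below) =====
def Claim_equal_add_to_group : Prop := ∀ (all_groups : List (List String)) (names : List String), Dom_add_to_group all_groups names → Spec_add_to_group all_groups names (add_to_group all_groups names)

-- ===== LEMMAS AND PROOFS =====
theorem contains_any_iff (g names : List String) :
    contains_any g names = true ↔ ∃ n ∈ names, n ∈ g := by
  induction names with
  | nil => simp [contains_any]
  | cons n rest ih =>
    simp only [contains_any]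
    by_cases h : n ∈ g
    · simp [h]
    · simp [h, ih]

theorem dedup_dedup_append (x y : List String) :
    PySem.List.dedup (PySem.List.dedup x ++ y) = PySem.List.dedup (x ++ y) := by
  simp [PySem.List.dedup_eq_ofList, PySem.Set.ofList_append, PySem.Set.ofList_ofList]

theorem addLoopA_spec (names : List String) :
    ∀ (gs acc : List (List String)) (x : List String),
      addLoopA names gs acc (PySem.List.dedup x) =
        (acc ++ (gs.filter (fun g => !contains_any g names)).map PySem.List.dedup,
         PySem.List.dedup (x ++ (gs.filter (fun g => contains_any g names)).flatMap
            (fun g => g ++ names))) := by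
  intro gs
  induction gs with
  | nil => intro acc x; simp [addLoopA]
  | cons g rest ih =>
    intro acc x
    by_cases h : contains_any g names = true
    · have step : PySem.List.dedup (PySem.List.dedup x ++ g ++ names)
          = PySem.List.dedup (x ++ (g ++ names)) := by
        rw [List.append_assoc, dedup_dedup_append]
      simp only [addLoopA, h, step]
      rw [ih acc (x ++ (g ++ names))]
      simp [h, List.append_assoc]
    · simp only [addLoopA, h]
      rw [if_neg Bool.false_ne_true, ih (acc ++ [PySem.List.dedup g]) x]
      rw [List.filter_cons_of_pos (by simp [h]), List.filter_cons_of_neg (by simp [h])]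
      simp [List.append_assoc]

theorem dedup_flat_ne_nil (names : List String) (m : List String)
    (hm : contains_any m names = true) (rest : List (List String)) :
    (PySem.List.dedup ((m :: rest).flatMap (fun g => g ++ names))).length > 0 := by
  rcases (contains_any_iff m names).1 hm with ⟨n, hn, hng⟩
  have hmem : n ∈ (m :: rest).flatMap (fun g => g ++ names) := by
    simp only [List.flatMap_cons, List.mem_append]
    left; left; exact hng
  have : n ∈ PySem.List.dedup ((m :: rest).flatMap (fun g => g ++ names)) :=
    (PySem.List.mem_dedup _ _).2 hmem
  exact List.length_pos_of_mem this

theorem idx_inner (g : List String) (j i : Int) (name : String)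
    (d : PySem.Dict String (PySem.Set Int)) :
    i ∈ (g.foldl (fun d n => d.modify n [] (fun s => PySem.Set.add s j)) d).getD name [] ↔
      i ∈ d.getD name [] ∨ (name ∈ g ∧ i = j) := by
  induction g generalizing d with
  | nil => simp
  | cons n rest ih =>
    rw [List.foldl_cons, ih]
    by_cases h : name = n
    · subst h
      rw [PySem.Dict.getD_modify, if_pos rfl, PySem.Set.mem_add]
      constructor
      · rintro ((h1 | h1) | ⟨hn, hi⟩)
        · exact Or.inl h1
        · exact Or.inr ⟨List.mem_cons_self .., h1⟩
        · exact Or.inr ⟨List.mem_cons_of_mem _ hn, hi⟩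
      · rintro (h1 | ⟨h2, hi⟩)
        · exact Or.inl (Or.inl h1)
        · rcases List.mem_cons.1 h2 with h3 | h3
          · exact Or.inl (Or.inr hi)
          · exact Or.inr ⟨h3, hi⟩
    · rw [PySem.Dict.getD_modify, if_neg h]
      simp [h]

theorem idx_fold (l : List (Int × List String)) (i : Int) (name : String)
    (d : PySem.Dict String (PySem.Set Int)) :
    i ∈ (l.foldl (fun d p => p.2.foldl
          (fun d n => d.modify n [] (fun s => PySem.Set.add s p.1)) d) d).getD name [] ↔
      i ∈ d.getD name [] ∨ ∃ p ∈ l, name ∈ p.2 ∧ i = p.1 := by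
  induction l generalizing d with
  | nil => simp
  | cons p rest ih =>
    rw [List.foldl_cons, ih, idx_inner]
    constructor
    · rintro ((h | ⟨hb, hc⟩) | ⟨q, hq, hn, he⟩)
      · exact Or.inl h
      · exact Or.inr ⟨p, List.mem_cons_self .., hb, hc⟩
      · exact Or.inr ⟨q, List.mem_cons_of_mem _ hq, hn, he⟩
    · rintro (h | ⟨q, hq, hn, he⟩)
      · exact Or.inl (Or.inl h)
      · rcases List.mem_cons.1 hq with rfl | hq'
        · exact Or.inl (Or.inr ⟨hn, he⟩)
        · exact Or.inr ⟨q, hq', hn, he⟩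

theorem mem_buildIndex (all_groups : List (List String)) (i : Int) (name : String) :
    i ∈ (buildIndex all_groups).getD name [] ↔
      ∃ p ∈ PySem.List.enumerate all_groups 0, name ∈ p.2 ∧ i = p.1 := by
  unfold buildIndex
  rw [idx_fold]
  simp

theorem mem_matchedSet (index : PySem.Dict String (PySem.Set Int)) (names : List String) (i : Int) :
    i ∈ matchedSet index names ↔ ∃ name ∈ names, i ∈ index.getD name [] := by
  unfold matchedSet
  suffices h : ∀ (ns : List String) (m : PySem.Set Int),
      i ∈ ns.foldl (fun m name => PySem.Set.update m (index.getD name [])) m ↔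
        i ∈ m ∨ ∃ name ∈ ns, i ∈ index.getD name [] by
    simpa using h names []
  intro ns
  induction ns with
  | nil => simp
  | cons n rest ih =>
    intro m
    rw [List.foldl_cons, ih, PySem.Set.mem_update]
    constructor
    · rintro ((h | h) | ⟨nm, hnm, h⟩)
      · exact Or.inl h
      · exact Or.inr ⟨n, List.mem_cons_self .., h⟩
      · exact Or.inr ⟨nm, List.mem_cons_of_mem _ hnm, h⟩
    · rintro (h | ⟨nm, hnm, h⟩)
      · exact Or.inl (Or.inl h)
      · rcases List.mem_cons.1 hnm with rfl | h'
        · exact Or.inl (Or.inr h)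
        · exact Or.inr ⟨nm, h', h⟩

theorem nodup_matchedSet (index : PySem.Dict String (PySem.Set Int)) (names : List String) :
    (matchedSet index names).Nodup := by
  unfold matchedSet
  suffices h : ∀ (ns : List String) (m : PySem.Set Int), m.Nodup →
      (ns.foldl (fun m name => PySem.Set.update m (index.getD name [])) m).Nodup by
    exact h names [] List.nodup_nil
  intro ns
  induction ns with
  | nil => intro m hm; simpa using hm
  | cons n rest ih => intro m hm; exact ih _ (PySem.Set.nodup_update _ _ hm)

theorem enum_fst_inj (all_groups : List (List String))
    {p q : Int × List String}
    (hp : p ∈ PySem.List.enumerate all_groups 0)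
    (hq : q ∈ PySem.List.enumerate all_groups 0) (h : p.1 = q.1) : p = q := by
  rcases (PySem.List.mem_enumerate_iff _ _ _).1 hp with ⟨k, hk, rfl⟩
  rcases (PySem.List.mem_enumerate_iff _ _ _).1 hq with ⟨k', hk', rfl⟩
  simp only [zero_add] at h
  have : k = k' := by exact_mod_cast h
  subst this
  rfl

theorem mem_matched_char (all_groups : List (List String)) (names : List String) (i : Int) :
    i ∈ matchedSet (buildIndex all_groups) names ↔
      ∃ p ∈ PySem.List.enumerate all_groups 0, contains_any p.2 names = true ∧ i = p.1 := by
  rw [mem_matchedSet]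
  constructor
  · rintro ⟨name, hn, hi⟩
    rcases (mem_buildIndex _ _ _).1 hi with ⟨p, hp, hnp, rfl⟩
    exact ⟨p, hp, (contains_any_iff _ _).2 ⟨name, hn, hnp⟩, rfl⟩
  · rintro ⟨p, hp, hca, rfl⟩
    rcases (contains_any_iff _ _).1 hca with ⟨name, hn, hnp⟩
    exact ⟨name, hn, (mem_buildIndex _ _ _).2 ⟨p, hp, hnp, rfl⟩⟩

-- the canonical (increasing) list of matched indices
theorem sorted_matched_eq (all_groups : List (List String)) (names : List String) :
    PySem.List.sorted (matchedSet (buildIndex all_groups) names) (fun x => x) =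
      ((PySem.List.enumerate all_groups 0).filter
        (fun p => contains_any p.2 names)).map (fun p => p.1) := by
  set C := ((PySem.List.enumerate all_groups 0).filter
      (fun p => contains_any p.2 names)).map (fun p => p.1) with hC
  have hpwC : C.Pairwise (fun a b => a < b) := by
    rw [hC, List.pairwise_map]
    exact List.Pairwise.sublist (List.filter_sublist)
      (PySem.List.pairwise_lt_enumerate all_groups 0)
  have hmemC : ∀ i, i ∈ C ↔
      ∃ p ∈ PySem.List.enumerate all_groups 0, contains_any p.2 names = true ∧ i = p.1 := by
    intro i
    rw [hC]
    simp only [List.mem_map, List.mem_filter]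
    constructor
    · rintro ⟨p, ⟨hp, hca⟩, rfl⟩; exact ⟨p, hp, hca, rfl⟩
    · rintro ⟨p, hp, hca, rfl⟩; exact ⟨p, ⟨hp, hca⟩, rfl⟩
  have hnodC : C.Nodup := hpwC.imp (fun h => ne_of_lt h)
  have hperm : C.Perm (matchedSet (buildIndex all_groups) names) := by
    rw [List.perm_ext_iff_of_nodup hnodC (nodup_matchedSet _ _)]
    intro i
    rw [hmemC, mem_matched_char]
  exact PySem.List.sorted_eq_of_perm_of_pairwise_lt _ _ _ hperm hpwC

theorem pyGetD_enum (all_groups : List (List String)) (p : Int × List String)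
    (hp : p ∈ PySem.List.enumerate all_groups 0) :
    PySem.List.pyGetD all_groups p.1 [] = p.2 := by
  rcases (PySem.List.mem_enumerate_iff _ _ _).1 hp with ⟨k, hk, rfl⟩
  simp only [zero_add]
  rw [PySem.List.pyGetD_natCast, List.getD_eq_getElem _ _ hk]

theorem filter_enum_snd (all_groups : List (List String)) (pred : List String → Bool) :
    ((PySem.List.enumerate all_groups 0).filter (fun p => pred p.2)).map (fun p => p.2) =
      all_groups.filter pred := by
  have h := @List.filter_map (Int × List String) (List String)
    (fun p => p.2) pred (PySem.List.enumerate all_groups 0)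
  rw [PySem.List.map_snd_enumerate] at h
  exact h.symm

theorem filter_enum_map (xs : List (List String)) (pred : List String → Bool)
    (F : List String → List String) :
    ((PySem.List.enumerate xs 0).filter (fun p => pred p.2)).map (fun p => F p.2) =
      (xs.filter pred).map F := by
  rw [← filter_enum_snd xs pred, List.map_map]
  rfl

theorem filter_enum_flat (xs : List (List String)) (pred : List String → Bool)
    (F : List String → List String) :
    ((PySem.List.enumerate xs 0).filter (fun p => pred p.2)).flatMap (fun p => F p.2) =
      (xs.filter pred).flatMap F := by
  rw [← filter_enum_snd xs pred, List.flatMap_map]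

-- ===== VERDICT (by name: the statement is the Claim_ definition above) =====
theorem add_to_group_spec : Claim_equal_add_to_group := by
  intro all_groups names _
  unfold Spec_add_to_group add_to_group add_to_group_alt
  dsimp only
  have hA := addLoopA_spec names all_groups [] []
  rw [show PySem.List.dedup ([] : List String) = [] from rfl] at hA
  rw [hA]
  simp only [List.nil_append]
  -- B's unmatched-groups pass
  have hres : (PySem.List.enumerate all_groups).foldl
      (fun acc p => if p.1 ∉ matchedSet (buildIndex all_groups) names then
        acc ++ [PySem.List.dedup p.2] else acc) [] =
      (all_groups.filter (fun g => !contains_any g names)).map PySem.List.dedup := by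
    rw [PySem.List.foldl_append_ite
      (fun p : Int × List String => p.1 ∉ matchedSet (buildIndex all_groups) names)
      (fun p : Int × List String => PySem.List.dedup p.2), List.nil_append]
    have hcongr : (PySem.List.enumerate all_groups 0).filter
        (fun p => decide (p.1 ∉ matchedSet (buildIndex all_groups) names)) =
        (PySem.List.enumerate all_groups 0).filter (fun p => !contains_any p.2 names) := by
      apply List.filter_congr
      intro p hp
      by_cases hca : contains_any p.2 names = true
      · simp only [hca, Bool.not_true, decide_eq_false_iff_not, Decidable.not_not]
        exact (mem_matched_char _ _ _).2 ⟨p, hp, hca, rfl⟩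
      · simp only [hca, Bool.not_false, decide_eq_true_eq]
        intro hmem
        rcases (mem_matched_char _ _ _).1 hmem with ⟨q, hq, hcq, hpq⟩
        have := enum_fst_inj all_groups hp hq hpq
        subst this
        exact hca hcq
    rw [hcongr]
    exact filter_enum_map all_groups (fun g => !contains_any g names) PySem.List.dedup
  rw [hres]
  -- B's merged group
  have hmerged : (PySem.List.sorted (matchedSet (buildIndex all_groups) names) (fun x => x)).foldl
      (fun m i => m ++ PySem.List.pyGetD all_groups i [] ++ names) [] =
      (all_groups.filter (fun g => contains_any g names)).flatMap (fun g => g ++ names) := by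
    have hshape : ∀ (l : List Int) (m : List String),
        l.foldl (fun m i => m ++ PySem.List.pyGetD all_groups i [] ++ names) m =
          l.foldl (fun m i => m ++ (PySem.List.pyGetD all_groups i [] ++ names)) m := by
      intro l; induction l with
      | nil => intro m; rfl
      | cons a t ih => intro m; rw [List.foldl_cons, List.foldl_cons, ih, List.append_assoc]
    rw [hshape, PySem.List.foldl_append_eq_flatMap, List.nil_append, sorted_matched_eq,
      List.flatMap_map]
    have hcg : ((PySem.List.enumerate all_groups 0).filter
          (fun p => contains_any p.2 names)).flatMap
          (fun a : Int × List String => PySem.List.pyGetD all_groups a.1 [] ++ names) =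
        ((PySem.List.enumerate all_groups 0).filter
          (fun p => contains_any p.2 names)).flatMap (fun p => p.2 ++ names) := by
      simp only [List.flatMap]
      refine congrArg List.flatten (List.map_congr_left ?_)
      intro p hp
      show PySem.List.pyGetD all_groups p.1 [] ++ names = p.2 ++ names
      rw [pyGetD_enum all_groups p (List.mem_of_mem_filter hp)]
    rw [hcg]
    exact filter_enum_flat all_groups (fun g => contains_any g names) (fun g => g ++ names)
  -- case split on whether anything matched
  cases hm : matchedSet (buildIndex all_groups) names with
  | nil =>
    have hfilter : all_groups.filter (fun g => contains_any g names) = [] := by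
      rw [List.filter_eq_nil_iff]
      intro g hg hca
      rcases List.mem_iff_getElem.1 hg with ⟨k, hk, rfl⟩
      have hp : (((k : Nat) : Int), all_groups[k]) ∈ PySem.List.enumerate all_groups 0 :=
        (PySem.List.mem_enumerate_iff _ _ _).2 ⟨k, hk, by rw [zero_add]⟩
      have hmem : (((k : Nat) : Int)) ∈ matchedSet (buildIndex all_groups) names :=
        (mem_matched_char _ _ _).2 ⟨_, hp, hca, rfl⟩
      rw [hm] at hmem
      exact absurd hmem (List.not_mem_nil)
    rw [hfilter]
    simp
  | cons a t =>
    cases hf : all_groups.filter (fun g => contains_any g names) with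
    | nil =>
      exfalso
      have ha : a ∈ matchedSet (buildIndex all_groups) names := by
        rw [hm]; exact List.mem_cons_self ..
      rcases (mem_matched_char _ _ _).1 ha with ⟨p, hp, hca, _⟩
      rcases (PySem.List.mem_enumerate_iff _ _ _).1 hp with ⟨k, hk, rfl⟩
      have : all_groups[k] ∈ all_groups.filter (fun g => contains_any g names) :=
        List.mem_filter.2 ⟨List.getElem_mem hk, hca⟩
      rw [hf] at this
      exact absurd this (List.not_mem_nil)
    | cons mg rest =>
      have hmP : contains_any mg names = true := by
        have : mg ∈ all_groups.filter (fun g => contains_any g names) := by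
          rw [hf]; exact List.mem_cons_self ..
        exact (List.mem_filter.1 this).2
      dsimp only
      rw [← hm, hmerged, hf]
      rw [if_pos (dedup_flat_ne_nil names mg hmP rest)]
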